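-- pv_equiv track=rewrite | github.com/metaliuyc/Compact-traces | main.py | partition_to_sets
-- ===== SOURCE A (Python) =====
-- def partition_to_sets(partition):
--     # Initialize variables
--     sets_of_integers = []
--     current_value = 1
--     # Iterate through the partition
--     for part_size in partition:
--         current_set = set(range(current_value, current_value + part_size))
--         sets_of_integers.append(current_set)
--         current_value += part_size
--     return sets_of_integers
-- ===== SOURCE B (Python) =====
-- def partition_to_sets(partition):
--     # Two-phase boundary-table decomposition: first compute each part's cumulative
--     # end boundary, derive the starts, then map each (start, end) pair to its set.
--     ends = [sum(partition[:i + 1]) for i in range(len(partition))]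
--     starts = [1] + [e + 1 for e in ends[:-1]]
--     return [set(range(s, e + 1)) for s, e in zip(starts, ends)]
-- ===== Notes on version B (the rewrite author's own statement) =====
-- stated objective: alternative
-- what changed: Replaces the accumulator-threaded loop by a two-phase decomposition: a boundary table of cumulative ends is built first, the starts are derived from it, and the output sets are produced in a separate zip/map pass.
import Mathlib
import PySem

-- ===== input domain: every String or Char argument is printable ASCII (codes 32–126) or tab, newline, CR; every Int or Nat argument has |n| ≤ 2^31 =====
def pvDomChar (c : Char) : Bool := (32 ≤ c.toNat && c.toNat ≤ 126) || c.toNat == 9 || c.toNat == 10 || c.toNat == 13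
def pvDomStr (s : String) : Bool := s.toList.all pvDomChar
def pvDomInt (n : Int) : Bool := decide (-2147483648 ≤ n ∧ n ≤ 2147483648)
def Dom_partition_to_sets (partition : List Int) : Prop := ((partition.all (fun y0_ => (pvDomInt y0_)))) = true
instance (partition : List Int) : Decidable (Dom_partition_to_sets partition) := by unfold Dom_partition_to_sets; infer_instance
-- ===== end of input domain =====

-- B replaces A's accumulator-threaded loop with a two-phase decomposition
-- (boundary table of cumulative ends, then a zip/map pass); objective: alternative.

-- ===== PORT A =====
-- A: single loop threading (sets_of_integers, current_value); set(range(a,b)) = Set.ofList (pyRange a b 1)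
def partition_to_sets (partition : List Int) : List (List Int) :=
  (partition.foldl
    (fun (st : List (List Int) × Int) part_size =>
      (st.1 ++ [PySem.Set.ofList (PySem.List.pyRange st.2 (st.2 + part_size) 1)],
       st.2 + part_size))
    (([] : List (List Int)), (1 : Int))).1

-- ===== PORT B =====
-- B: ends = [sum(partition[:i+1]) for i in range(len(partition))]; starts = [1] + [e+1 for e in ends[:-1]];
--    [set(range(s, e+1)) for s, e in zip(starts, ends)]
def partition_to_sets_alt (partition : List Int) : List (List Int) :=
  let ends : List Int :=
    (List.range partition.length).map
      (fun (i : Nat) => (PySem.List.slice partition none (some ((i : Int) + 1))).sum)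
  let starts : List Int := 1 :: ends.dropLast.map (fun e => e + 1)
  (starts.zip ends).map
    (fun se => PySem.Set.ofList (PySem.List.pyRange se.1 (se.2 + 1) 1))

-- ===== PRECONDITION & SPEC =====
def Spec_partition_to_sets (partition : List Int) (out : List (List Int)) : Prop := out = partition_to_sets_alt partition
instance (partition : List Int) (out : List (List Int)) : Decidable (Spec_partition_to_sets partition out) := by unfold Spec_partition_to_sets; infer_instance

-- ===== CLAIM (what is proved, stated in full; the proofs are below) =====
def Claim_equal_partition_to_sets : Prop := ∀ (partition : List Int), Dom_partition_to_sets partition → Spec_partition_to_sets partition (partition_to_sets partition)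

-- ===== LEMMAS AND PROOFS =====

/-- Reference shape: list of consecutive-range sets starting at `c`. -/
def pvBuildFrom : List Int → Int → List (List Int)
  | [], _ => []
  | k :: t, c => PySem.Set.ofList (PySem.List.pyRange c (c + k) 1) :: pvBuildFrom t (c + k)

/-- Cumulative end boundaries with an offset `b`. -/
def pvEndsFrom (xs : List Int) (b : Int) : List Int :=
  (List.range xs.length).map (fun i => b + (xs.take (i + 1)).sum)

theorem pvEndsFrom_cons (k : Int) (t : List Int) (b : Int) :
    pvEndsFrom (k :: t) b = (b + k) :: pvEndsFrom t (b + k) := by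
  simp [pvEndsFrom, List.range_succ_eq_map, List.map_map, Function.comp_def, add_assoc]

theorem pvEndsFrom_length (xs : List Int) (b : Int) :
    (pvEndsFrom xs b).length = xs.length := by
  simp [pvEndsFrom]

theorem pvFoldA (xs : List Int) (acc : List (List Int)) (c : Int) :
    (xs.foldl
      (fun (st : List (List Int) × Int) part_size =>
        (st.1 ++ [PySem.Set.ofList (PySem.List.pyRange st.2 (st.2 + part_size) 1)],
         st.2 + part_size))
      (acc, c)).1 = acc ++ pvBuildFrom xs c := by
  induction xs generalizing acc c with
  | nil => simp [pvBuildFrom]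
  | cons k t ih => simp [pvBuildFrom, ih]

theorem pvZipMapB (xs : List Int) (b : Int) :
    ((((b + 1) :: (pvEndsFrom xs b).dropLast.map (fun e => e + 1)).zip (pvEndsFrom xs b)).map
      (fun se => PySem.Set.ofList (PySem.List.pyRange se.1 (se.2 + 1) 1)))
    = pvBuildFrom xs (b + 1) := by
  induction xs generalizing b with
  | nil => simp [pvEndsFrom, pvBuildFrom]
  | cons k t ih =>
    rw [pvEndsFrom_cons]
    cases t with
    | nil =>
      simp [pvEndsFrom, pvBuildFrom]
      ring_nf
    | cons k2 t2 =>
      have hne : pvEndsFrom (k2 :: t2) (b + k) ≠ [] := by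
        intro h
        have := pvEndsFrom_length (k2 :: t2) (b + k)
        rw [h] at this
        simp at this
      rw [List.dropLast_cons_of_ne_nil hne]
      have heq : b + k + 1 = (b + k) + 1 := rfl
      simp only [List.map_cons, List.zip_cons_cons, List.map]
      rw [show ((b + k + 1) :: (pvEndsFrom (k2 :: t2) (b + k)).dropLast.map (fun e => e + 1))
            = (((b + k) + 1) :: (pvEndsFrom (k2 :: t2) (b + k)).dropLast.map (fun e => e + 1)) from rfl]
      rw [ih (b + k)]
      show _ = pvBuildFrom (k :: k2 :: t2) (b + 1)
      simp [pvBuildFrom]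
      constructor
      · ring_nf
      · have h2 : b + 1 + k = b + k + 1 := by ring
        rw [h2]
        exact ⟨rfl, rfl⟩

theorem pvAltEq (partition : List Int) :
    partition_to_sets_alt partition
    = (((0 + 1 : Int) :: (pvEndsFrom partition 0).dropLast.map (fun e => e + 1)).zip
        (pvEndsFrom partition 0)).map
        (fun se => PySem.Set.ofList (PySem.List.pyRange se.1 (se.2 + 1) 1)) := by
  unfold partition_to_sets_alt
  have hends : (List.range partition.length).map
      (fun (i : Nat) => (PySem.List.slice partition none (some ((i : Int) + 1))).sum)
      = pvEndsFrom partition 0 := by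
    unfold pvEndsFrom
    apply List.map_congr_left
    intro i _
    have : ((i : Int) + 1) = ((i + 1 : Nat) : Int) := by push_cast; ring
    rw [this, PySem.List.slice_to_natCast]
    simp
  simp only [hends]
  norm_num

-- ===== VERDICT (by name: the statement is the Claim_ definition above) =====
theorem partition_to_sets_spec : Claim_equal_partition_to_sets := by
  intro partition _
  unfold Spec_partition_to_sets
  rw [pvAltEq, pvZipMapB]
  unfold partition_to_sets
  rw [pvFoldA]
  norm_num
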